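-- pv_equiv track=rewrite | github.com/kartikvasnani07/sentinel | assistant/main.py | _resolve_custom_voice_choice
-- ===== SOURCE A (Python) =====
-- def _resolve_custom_voice_choice(choice, profiles):
--     cleaned = str(choice or "").strip().lower()
--     if not cleaned:
--         return None
--     if cleaned.startswith("c") and cleaned[1:].isdigit():
--         index = int(cleaned[1:]) - 1
--         if 0 <= index < len(profiles):
--             return profiles[index]
--     if cleaned.isdigit():
--         index = int(cleaned) - 1
--         if 0 <= index < len(profiles):
--             return profiles[index]
--     for profile in profiles:
--         if str(profile.get("name") or "").strip().lower() == cleaned: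
--             return profile
--     for profile in profiles:
--         if cleaned in str(profile.get("name") or "").strip().lower():
--             return profile
--     return None
-- ===== SOURCE B (Python) =====
-- def _resolve_custom_voice_choice(choice, profiles):
--     cleaned = str(choice or "").strip().lower()
--     if not cleaned:
--         return None
--     digits = cleaned[1:] if cleaned.startswith("c") else cleaned
--     if digits.isdigit():
--         i = int(digits) - 1
--         if 0 <= i < len(profiles):
--             return profiles[i]
--     candidate = None
--     for profile in profiles:
--         name = str(profile.get("name") or "").strip().lower()
--         if name == cleaned:
--             return profile
--         if candidate is None and cleaned in name:
--             candidate = profile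
--     return candidate
-- ===== Notes on version B (the rewrite author's own statement) =====
-- stated objective: simpler
-- what changed: A's two separate index branches (the 'cN' form and the plain-digit form) are unified into one branch that first strips an optional leading 'c' (correct because a string starting with 'c' never passes isdigit), and the two name-matching scans (exact, then substring) are fused into a single pass that returns an exact match immediately and records the first substring match as a candidate returned after the loop.
import Mathlib
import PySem

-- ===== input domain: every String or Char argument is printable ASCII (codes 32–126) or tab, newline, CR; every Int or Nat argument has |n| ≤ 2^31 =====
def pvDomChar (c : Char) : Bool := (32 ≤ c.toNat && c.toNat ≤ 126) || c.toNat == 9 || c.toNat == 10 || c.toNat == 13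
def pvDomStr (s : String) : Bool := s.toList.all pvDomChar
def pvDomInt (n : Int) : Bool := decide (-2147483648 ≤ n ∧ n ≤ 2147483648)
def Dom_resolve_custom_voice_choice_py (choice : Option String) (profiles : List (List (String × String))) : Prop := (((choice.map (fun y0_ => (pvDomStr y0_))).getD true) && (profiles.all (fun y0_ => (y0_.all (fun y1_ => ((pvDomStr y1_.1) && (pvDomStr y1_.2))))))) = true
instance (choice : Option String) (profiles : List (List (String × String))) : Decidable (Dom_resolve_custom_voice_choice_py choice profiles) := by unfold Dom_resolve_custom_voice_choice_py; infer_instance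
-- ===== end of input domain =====

-- B unifies A's two index branches into one (strip an optional leading 'c', then one
-- digit/range test) and fuses A's two name-matching scans into a single candidate-tracking
-- pass (objective: simpler).

-- ===== PORT A =====
-- str(profile.get("name") or "").strip().lower()  (get on a dict → first-match assoc lookup)
def pvNameA (profile : List (String × String)) : String :=
  PySem.Str.lower (PySem.Str.strip (((PySem.Dict.mk profile).get? "name").getD ""))

-- the int(...) calls are guarded by isdigit, so ofStr? is always `some` where it is read;
-- the two in-range guards fold the nested `if 0 <= index < len` into the branch condition.
def resolve_custom_voice_choice_py (choice : Option String) (profiles : List (List (String × String))) : Option (List (String × String)) :=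
  let cleaned := PySem.Str.lower (PySem.Str.strip (choice.getD ""))
  let idx1 := (PySem.Int.ofStr? (PySem.Str.slice cleaned (some 1) none)).getD 0 - 1
  let idx2 := (PySem.Int.ofStr? cleaned).getD 0 - 1
  if cleaned = "" then none
  else if PySem.Str.startswith cleaned "c" = true
        ∧ PySem.Str.strIsdigit (PySem.Str.slice cleaned (some 1) none) = true
        ∧ 0 ≤ idx1 ∧ idx1 < (profiles.length : Int) then
    PySem.List.pyGet? profiles idx1
  else if PySem.Str.strIsdigit cleaned = true ∧ 0 ≤ idx2 ∧ idx2 < (profiles.length : Int) then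
    PySem.List.pyGet? profiles idx2
  else
    match profiles.find? (fun p => pvNameA p == cleaned) with
    | some p => some p
    | none => profiles.find? (fun p => PySem.Str.isIn cleaned (pvNameA p))

-- ===== PORT B =====
-- digits = cleaned[1:] if cleaned.startswith("c") else cleaned; one digit/range test
def pvIdxB (cleaned : String) (n : Int) : Option Int :=
  let digits := if PySem.Str.startswith cleaned "c" then PySem.Str.slice cleaned (some 1) none else cleaned
  if PySem.Str.strIsdigit digits then
    let i := (PySem.Int.ofStr? digits).getD 0 - 1
    if 0 ≤ i ∧ i < n then some i else none
  else none

-- single scan: exact match returns at once, first substring match is recorded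
def pvScanB (cleaned : String) (ps : List (List (String × String))) (cand : Option (List (String × String))) : Option (List (String × String)) :=
  match ps with
  | [] => cand
  | p :: rest =>
    let name := PySem.Str.lower (PySem.Str.strip (((PySem.Dict.mk p).get? "name").getD ""))
    if name == cleaned then some p
    else pvScanB cleaned rest (if cand.isNone && PySem.Str.isIn cleaned name then some p else cand)

def resolve_custom_voice_choice_py_alt (choice : Option String) (profiles : List (List (String × String))) : Option (List (String × String)) :=
  let cleaned := PySem.Str.lower (PySem.Str.strip (choice.getD ""))
  if cleaned = "" then none
  else
    match pvIdxB cleaned (profiles.length : Int) with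
    | some i => PySem.List.pyGet? profiles i
    | none => pvScanB cleaned profiles none

-- ===== PRECONDITION & SPEC =====
def Spec_resolve_custom_voice_choice_py (choice : Option String) (profiles : List (List (String × String))) (out : Option (List (String × String))) : Prop := out = resolve_custom_voice_choice_py_alt choice profiles
instance (choice : Option String) (profiles : List (List (String × String))) (out : Option (List (String × String))) : Decidable (Spec_resolve_custom_voice_choice_py choice profiles out) := by unfold Spec_resolve_custom_voice_choice_py; infer_instance

-- ===== CLAIM (what is proved, stated in full; the proofs are below) =====
def Claim_equal_resolve_custom_voice_choice_py : Prop := ∀ (choice : Option String) (profiles : List (List (String × String))), Dom_resolve_custom_voice_choice_py choice profiles → Spec_resolve_custom_voice_choice_py choice profiles (resolve_custom_voice_choice_py choice profiles)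

-- ===== LEMMAS AND PROOFS =====

-- a string starting with 'c' is never all digits
theorem pv_startswith_c_not_digit (s : String) (h : PySem.Str.startswith s "c" = true) :
    PySem.Chars.strIsdigit s.toList = false := by
  simp only [PySem.Str.startswith_eq] at h
  obtain ⟨t, ht⟩ := (PySem.Chars.startswith_iff s.toList "c".toList).mp h
  simp at ht
  rw [← ht]
  simp [PySem.Chars.strIsdigit, PySem.Chars.isdigit]

-- invariant of B's fused scan: it returns the first exact match if any, else the
-- incoming candidate if set, else the first substring match
theorem pvScanB_inv (cleaned : String) (ps : List (List (String × String))) :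
    ∀ cand, pvScanB cleaned ps cand =
      match ps.find? (fun p => pvNameA p == cleaned) with
      | some p => some p
      | none =>
        match cand with
        | some c => some c
        | none => ps.find? (fun p => PySem.Str.isIn cleaned (pvNameA p)) := by
  induction ps with
  | nil => intro cand; cases cand <;> simp [pvScanB]
  | cons p rest ih =>
    intro cand
    simp only [pvScanB, List.find?, pvNameA]
    by_cases hx : PySem.Str.lower (PySem.Str.strip (((PySem.Dict.mk p).get? "name").getD "")) == cleaned
    · simp [hx]
    · simp only [Bool.not_eq_true] at hx
      simp only [hx, ih]
      cases cand with
      | some c => simp [pvNameA]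
      | none =>
        by_cases hs : PySem.Chars.isIn cleaned.toList (PySem.Chars.lower (PySem.Chars.strip ((((PySem.Dict.mk p).get? "name").getD "").toList))) = true
        · simp [pvNameA, hs]
        · simp only [Bool.not_eq_true] at hs
          simp [pvNameA, hs]

-- ===== VERDICT (by name: the statement is the Claim_ definition above) =====
theorem resolve_custom_voice_choice_py_spec : Claim_equal_resolve_custom_voice_choice_py := by
  intro choice profiles _
  unfold Spec_resolve_custom_voice_choice_py resolve_custom_voice_choice_py resolve_custom_voice_choice_py_alt
  simp only []
  set cleaned := PySem.Str.lower (PySem.Str.strip (choice.getD "")) with hcl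
  by_cases h0 : cleaned = ""
  · simp [h0]
  · simp only [h0, if_false]
    by_cases hc : PySem.Str.startswith cleaned "c" = true
    · -- starts with 'c': A's second index branch is dead (cleaned is not all digits)
      have hnd := pv_startswith_c_not_digit cleaned hc
      simp only [pvIdxB, hc, if_true]
      by_cases hd : PySem.Chars.strIsdigit (PySem.List.slice cleaned.toList (some 1) none) = true
      · by_cases hr : 1 ≤ (PySem.Int.ofStr? (PySem.Str.slice cleaned (some 1) none)).getD 0
            ∧ (PySem.Int.ofStr? (PySem.Str.slice cleaned (some 1) none)).getD 0 ≤ (profiles.length : Int)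
        · simp [hd, hr.1, hr.2]
        · simp [hd, hr, hnd, pvScanB_inv]
      · simp [hd, hnd, pvScanB_inv]
    · -- no leading 'c': A's first index branch is dead; digits = cleaned
      simp only [Bool.not_eq_true] at hc
      simp only [pvIdxB, hc, Bool.false_eq_true, if_false]
      by_cases hd : PySem.Chars.strIsdigit cleaned.toList = true
      · by_cases hr : 1 ≤ (PySem.Int.ofStr? cleaned).getD 0
            ∧ (PySem.Int.ofStr? cleaned).getD 0 ≤ (profiles.length : Int)
        · simp [hd, hr.1, hr.2]
        · simp [hd, hr, pvScanB_inv]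
      · simp [hd, pvScanB_inv]
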